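-- pv_equiv track=rewrite | github.com/endomorphosis/ipfs_accelerate_py | scripts/analyze_mcp_coverage.py | categorize_tools
-- ===== SOURCE A (Python) =====
-- from typing import Dict, List, Set, Tuple
--
-- def categorize_tools(tools: List[str]) -> Dict[str, List[str]]:
--     """Categorize tools by prefix/type."""
--     categories = {
--         'GitHub': [],
--         'Docker': [],
--         'Hardware': [],
--         'Runner': [],
--         'IPFS Files': [],
--         'Network': [],
--         'Models': [],
--         'Inference': [],
--         'Workflows': [],
--         'Endpoints': [],
--         'Status': [],
--         'Dashboard': [],
--         'System': [],
--         'Other': []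
--     }
--
--     for tool in tools:
--         tool_lower = tool.lower()
--
--         if 'github' in tool_lower:
--             categories['GitHub'].append(tool)
--         elif 'docker' in tool_lower:
--             categories['Docker'].append(tool)
--         elif 'hardware' in tool_lower:
--             categories['Hardware'].append(tool)
--         elif 'runner' in tool_lower or 'autoscaler' in tool_lower:
--             categories['Runner'].append(tool)
--         elif 'ipfs' in tool_lower or 'files' in tool_lower:
--             categories['IPFS Files'].append(tool)
--         elif 'network' in tool_lower or 'peer' in tool_lower or 'swarm' in tool_lower:
--             categories['Network'].append(tool)
--         elif 'model' in tool_lower or 'search' in tool_lower or 'recommend' in tool_lower: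
--             categories['Models'].append(tool)
--         elif 'inference' in tool_lower or 'generate' in tool_lower or 'classify' in tool_lower:
--             categories['Inference'].append(tool)
--         elif 'workflow' in tool_lower:
--             categories['Workflows'].append(tool)
--         elif 'endpoint' in tool_lower:
--             categories['Endpoints'].append(tool)
--         elif 'status' in tool_lower or 'health' in tool_lower:
--             categories['Status'].append(tool)
--         elif 'dashboard' in tool_lower or 'stats' in tool_lower:
--             categories['Dashboard'].append(tool)
--         elif 'log' in tool_lower or 'system' in tool_lower:
--             categories['System'].append(tool)
--         else:
--             categories['Other'].append(tool)
--
--     # Remove empty categories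
--     return {k: v for k, v in categories.items() if v}
-- ===== SOURCE B (Python) =====
-- RULES = [
--     ('GitHub', ['github']),
--     ('Docker', ['docker']),
--     ('Hardware', ['hardware']),
--     ('Runner', ['runner', 'autoscaler']),
--     ('IPFS Files', ['ipfs', 'files']),
--     ('Network', ['network', 'peer', 'swarm']),
--     ('Models', ['model', 'search', 'recommend']),
--     ('Inference', ['inference', 'generate', 'classify']),
--     ('Workflows', ['workflow']),
--     ('Endpoints', ['endpoint']),
--     ('Status', ['status', 'health']),
--     ('Dashboard', ['dashboard', 'stats']),
--     ('System', ['log', 'system']),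
-- ]
--
-- def categorize_tools(tools):
--     """Categorize tools by prefix/type.
--
--     Staged filtering: one pass per category over a shrinking pool; tools
--     claimed by a category are removed from the pool before the next
--     category is considered, so branch priority falls out of the staging.
--     """
--     pool = [(t, t.lower()) for t in tools]
--     result = []
--     for name, kws in RULES:
--         matched = [t for t, tl in pool if any(k in tl for k in kws)]
--         if matched:
--             result.append((name, matched))
--         pool = [p for p in pool if not any(k in p[1] for k in kws)]
--     if pool:
--         result.append(('Other', [t for t, _ in pool]))
--     return dict(result)
-- ===== Notes on version B (the rewrite author's own statement) =====
-- stated objective: alternative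
-- what changed: Instead of A's tool-major single pass dispatching each tool through a 13-branch if/elif chain into pre-seeded buckets, B is category-major: for each category in priority order it filters its matches out of a shrinking pool of remaining tools, appends the nonempty group to the output, and the leftover pool becomes 'Other'.
import Mathlib
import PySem

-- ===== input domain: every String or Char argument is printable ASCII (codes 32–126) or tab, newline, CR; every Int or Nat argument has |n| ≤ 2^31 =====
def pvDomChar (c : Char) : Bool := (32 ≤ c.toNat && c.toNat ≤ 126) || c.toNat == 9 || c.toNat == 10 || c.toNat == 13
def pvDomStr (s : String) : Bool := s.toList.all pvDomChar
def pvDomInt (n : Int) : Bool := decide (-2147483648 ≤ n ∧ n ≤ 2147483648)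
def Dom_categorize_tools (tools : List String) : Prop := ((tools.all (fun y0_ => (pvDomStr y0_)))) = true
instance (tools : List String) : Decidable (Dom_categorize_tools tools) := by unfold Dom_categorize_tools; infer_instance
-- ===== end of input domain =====

-- B replaces A's tool-major pass through a 13-branch if/elif chain with category-major
-- staged filtering over a shrinking pool of tools; same result, different traversal.

-- ===== PORT A =====
-- the initial categories dict, in A's declared order
def catsInitA : PySem.Dict String (List String) :=
  PySem.Dict.ofList [("GitHub", []), ("Docker", []), ("Hardware", []), ("Runner", []),
    ("IPFS Files", []), ("Network", []), ("Models", []), ("Inference", []), ("Workflows", []),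
    ("Endpoints", []), ("Status", []), ("Dashboard", []), ("System", []), ("Other", [])]

-- one iteration of A's loop body: the if/elif chain, appending tool to the chosen bucket
def stepA (categories : PySem.Dict String (List String)) (tool : String) :
    PySem.Dict String (List String) :=
  let tl := PySem.Str.lower tool
  if PySem.Str.isIn "github" tl then categories.modify "GitHub" [] (· ++ [tool])
  else if PySem.Str.isIn "docker" tl then categories.modify "Docker" [] (· ++ [tool])
  else if PySem.Str.isIn "hardware" tl then categories.modify "Hardware" [] (· ++ [tool])
  else if PySem.Str.isIn "runner" tl || PySem.Str.isIn "autoscaler" tl then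
    categories.modify "Runner" [] (· ++ [tool])
  else if PySem.Str.isIn "ipfs" tl || PySem.Str.isIn "files" tl then
    categories.modify "IPFS Files" [] (· ++ [tool])
  else if PySem.Str.isIn "network" tl || PySem.Str.isIn "peer" tl || PySem.Str.isIn "swarm" tl then
    categories.modify "Network" [] (· ++ [tool])
  else if PySem.Str.isIn "model" tl || PySem.Str.isIn "search" tl || PySem.Str.isIn "recommend" tl then
    categories.modify "Models" [] (· ++ [tool])
  else if PySem.Str.isIn "inference" tl || PySem.Str.isIn "generate" tl || PySem.Str.isIn "classify" tl then
    categories.modify "Inference" [] (· ++ [tool])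
  else if PySem.Str.isIn "workflow" tl then categories.modify "Workflows" [] (· ++ [tool])
  else if PySem.Str.isIn "endpoint" tl then categories.modify "Endpoints" [] (· ++ [tool])
  else if PySem.Str.isIn "status" tl || PySem.Str.isIn "health" tl then
    categories.modify "Status" [] (· ++ [tool])
  else if PySem.Str.isIn "dashboard" tl || PySem.Str.isIn "stats" tl then
    categories.modify "Dashboard" [] (· ++ [tool])
  else if PySem.Str.isIn "log" tl || PySem.Str.isIn "system" tl then
    categories.modify "System" [] (· ++ [tool])
  else categories.modify "Other" [] (· ++ [tool])

def categorize_tools (tools : List String) : List (String × List String) :=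
  (tools.foldl stepA catsInitA).items.filter (fun p => !p.2.isEmpty)

-- ===== PORT B =====
def RULES : List (String × List String) :=
  [("GitHub", ["github"]), ("Docker", ["docker"]), ("Hardware", ["hardware"]),
   ("Runner", ["runner", "autoscaler"]), ("IPFS Files", ["ipfs", "files"]),
   ("Network", ["network", "peer", "swarm"]), ("Models", ["model", "search", "recommend"]),
   ("Inference", ["inference", "generate", "classify"]), ("Workflows", ["workflow"]),
   ("Endpoints", ["endpoint"]), ("Status", ["status", "health"]),
   ("Dashboard", ["dashboard", "stats"]), ("System", ["log", "system"])]

-- 'any(k in tl for k in kws)'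
def hitAny (kws : List String) (tl : String) : Bool := kws.any (fun k => PySem.Str.isIn k tl)

-- B's loop body: extract this category's matches from the pool, keep the rest
def stepB (st : List (String × List String) × List (String × String))
    (rule : String × List String) : List (String × List String) × List (String × String) :=
  let matched := (st.2.filter (fun p => hitAny rule.2 p.2)).map (·.1)
  ((if matched.isEmpty then st.1 else st.1 ++ [(rule.1, matched)]),
   st.2.filter (fun p => !hitAny rule.2 p.2))

-- Source B returns dict(result); result's keys are distinct, so the dict is result in order
def categorize_tools_alt (tools : List String) : List (String × List String) :=
  let pool := tools.map (fun t => (t, PySem.Str.lower t))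
  let st := RULES.foldl stepB ([], pool)
  if st.2.isEmpty then st.1 else st.1 ++ [("Other", st.2.map (·.1))]

-- ===== PRECONDITION & SPEC =====
def Spec_categorize_tools (tools : List String) (out : List (String × List String)) : Prop := out = categorize_tools_alt tools
instance (tools : List String) (out : List (String × List String)) : Decidable (Spec_categorize_tools tools out) := by unfold Spec_categorize_tools; infer_instance

-- ===== CLAIM (what is proved, stated in full; the proofs are below) =====
def Claim_equal_categorize_tools : Prop := ∀ (tools : List String), Dom_categorize_tools tools → Spec_categorize_tools tools (categorize_tools tools)

-- ===== LEMMAS AND PROOFS =====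

-- the first-match classifier induced by A's if/elif chain
def catOf (tool : String) : String :=
  let tl := PySem.Str.lower tool
  if PySem.Str.isIn "github" tl then "GitHub"
  else if PySem.Str.isIn "docker" tl then "Docker"
  else if PySem.Str.isIn "hardware" tl then "Hardware"
  else if PySem.Str.isIn "runner" tl || PySem.Str.isIn "autoscaler" tl then "Runner"
  else if PySem.Str.isIn "ipfs" tl || PySem.Str.isIn "files" tl then "IPFS Files"
  else if PySem.Str.isIn "network" tl || PySem.Str.isIn "peer" tl || PySem.Str.isIn "swarm" tl then "Network"
  else if PySem.Str.isIn "model" tl || PySem.Str.isIn "search" tl || PySem.Str.isIn "recommend" tl then "Models"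
  else if PySem.Str.isIn "inference" tl || PySem.Str.isIn "generate" tl || PySem.Str.isIn "classify" tl then "Inference"
  else if PySem.Str.isIn "workflow" tl then "Workflows"
  else if PySem.Str.isIn "endpoint" tl then "Endpoints"
  else if PySem.Str.isIn "status" tl || PySem.Str.isIn "health" tl then "Status"
  else if PySem.Str.isIn "dashboard" tl || PySem.Str.isIn "stats" tl then "Dashboard"
  else if PySem.Str.isIn "log" tl || PySem.Str.isIn "system" tl then "System"
  else "Other"

-- the same classifier read off an arbitrary rules table
def firstCatR (rules : List (String × List String)) (tool : String) : String :=
  match rules with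
  | [] => "Other"
  | (n, kws) :: rest => if hitAny kws (PySem.Str.lower tool) then n else firstCatR rest tool

theorem catOf_eq_firstCatR : catOf = firstCatR RULES := by
  funext t
  simp only [catOf, firstCatR, RULES, hitAny, List.any_cons, List.any_nil, Bool.or_false, Bool.or_assoc]

theorem firstCatR_mem (rules : List (String × List String)) (t : String) :
    firstCatR rules t ∈ rules.map (·.1) ++ ["Other"] := by
  induction rules with
  | nil => simp [firstCatR]
  | cons r rest ih =>
    obtain ⟨n, kws⟩ := r
    simp only [firstCatR]
    split_ifs
    · simp
    · simp only [List.map_cons, List.cons_append, List.mem_cons]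
      exact Or.inr ih

theorem stepA_eq_modify (d : PySem.Dict String (List String)) (t : String) :
    stepA d t = d.modify (catOf t) [] (· ++ [t]) := by
  simp only [stepA, catOf]
  by_cases h1 : PySem.Str.isIn "github" (PySem.Str.lower t) = true
  · simp only [h1, if_true]
  by_cases h2 : PySem.Str.isIn "docker" (PySem.Str.lower t) = true
  · simp only [h1, h2, Bool.false_eq_true, if_true, if_false]
  by_cases h3 : PySem.Str.isIn "hardware" (PySem.Str.lower t) = true
  · simp only [h1, h2, h3, Bool.false_eq_true, if_true, if_false]
  by_cases h4 : (PySem.Str.isIn "runner" (PySem.Str.lower t) || PySem.Str.isIn "autoscaler" (PySem.Str.lower t)) = true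
  · simp only [h1, h2, h3, h4, Bool.false_eq_true, if_true, if_false]
  by_cases h5 : (PySem.Str.isIn "ipfs" (PySem.Str.lower t) || PySem.Str.isIn "files" (PySem.Str.lower t)) = true
  · simp only [h1, h2, h3, h4, h5, Bool.false_eq_true, if_true, if_false]
  by_cases h6 : (PySem.Str.isIn "network" (PySem.Str.lower t) || PySem.Str.isIn "peer" (PySem.Str.lower t) || PySem.Str.isIn "swarm" (PySem.Str.lower t)) = true
  · simp only [h1, h2, h3, h4, h5, h6, Bool.false_eq_true, if_true, if_false]
  by_cases h7 : (PySem.Str.isIn "model" (PySem.Str.lower t) || PySem.Str.isIn "search" (PySem.Str.lower t) || PySem.Str.isIn "recommend" (PySem.Str.lower t)) = true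
  · simp only [h1, h2, h3, h4, h5, h6, h7, Bool.false_eq_true, if_true, if_false]
  by_cases h8 : (PySem.Str.isIn "inference" (PySem.Str.lower t) || PySem.Str.isIn "generate" (PySem.Str.lower t) || PySem.Str.isIn "classify" (PySem.Str.lower t)) = true
  · simp only [h1, h2, h3, h4, h5, h6, h7, h8, Bool.false_eq_true, if_true, if_false]
  by_cases h9 : PySem.Str.isIn "workflow" (PySem.Str.lower t) = true
  · simp only [h1, h2, h3, h4, h5, h6, h7, h8, h9, Bool.false_eq_true, if_true, if_false]
  by_cases h10 : PySem.Str.isIn "endpoint" (PySem.Str.lower t) = true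
  · simp only [h1, h2, h3, h4, h5, h6, h7, h8, h9, h10, Bool.false_eq_true, if_true, if_false]
  by_cases h11 : (PySem.Str.isIn "status" (PySem.Str.lower t) || PySem.Str.isIn "health" (PySem.Str.lower t)) = true
  · simp only [h1, h2, h3, h4, h5, h6, h7, h8, h9, h10, h11, Bool.false_eq_true, if_true, if_false]
  by_cases h12 : (PySem.Str.isIn "dashboard" (PySem.Str.lower t) || PySem.Str.isIn "stats" (PySem.Str.lower t)) = true
  · simp only [h1, h2, h3, h4, h5, h6, h7, h8, h9, h10, h11, h12, Bool.false_eq_true, if_true, if_false]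
  by_cases h13 : (PySem.Str.isIn "log" (PySem.Str.lower t) || PySem.Str.isIn "system" (PySem.Str.lower t)) = true
  · simp only [h1, h2, h3, h4, h5, h6, h7, h8, h9, h10, h11, h12, h13, Bool.false_eq_true, if_true, if_false]
  simp only [h1, h2, h3, h4, h5, h6, h7, h8, h9, h10, h11, h12, h13, Bool.false_eq_true, if_false]

-- ===== A-side characterisation: bucket contents and keys of the folded dict =====

theorem foldA_getD (tools : List String) (c : String) :
    (tools.foldl stepA catsInitA).getD c [] =
      catsInitA.getD c [] ++ tools.filter (fun t => catOf t == c) := by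
  have h1 : tools.foldl stepA catsInitA
      = (tools.map (fun t => (catOf t, t))).foldl
          (fun d p => d.modify p.1 [] (· ++ [p.2])) catsInitA := by
    rw [List.foldl_map]
    exact List.foldl_ext _ _ catsInitA (fun acc x _ => stepA_eq_modify acc x)
  rw [h1, PySem.Dict.getD_foldl_modify_append]
  congr 1
  rw [List.filter_map]
  simp [Function.comp_def]

theorem setUpdate_of_subset (l : List String) (s : PySem.Set String)
    (h : ∀ x ∈ l, x ∈ s) : PySem.Set.update s l = s := by
  induction l generalizing s with
  | nil => rfl
  | cons x xs ih =>
    simp only [PySem.Set.update, List.foldl_cons] at *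
    rw [show PySem.Set.add s x = s by simp [PySem.Set.add, h x (by simp)]]
    exact ih s (fun y hy => h y (by simp [hy]))

theorem catOf_mem_keysInit (t : String) : catOf t ∈ catsInitA.keys := by
  have h := firstCatR_mem RULES t
  rw [← catOf_eq_firstCatR] at h
  have hsub : ∀ x ∈ RULES.map (·.1) ++ ["Other"], x ∈ catsInitA.keys := by decide
  exact hsub _ h

theorem foldA_keys (tools : List String) :
    (tools.foldl stepA catsInitA).keys = catsInitA.keys := by
  have h2 := PySem.Dict.keys_foldl_modify_key tools catOf ([] : List String)
      (fun _ t => (· ++ [t])) catsInitA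
  calc (tools.foldl stepA catsInitA).keys
      = (List.foldl (fun d x => PySem.Dict.modify d (catOf x) []
          ((fun _ t => (· ++ [t])) d x)) catsInitA tools).keys := by
        congr 1
        exact List.foldl_ext _ _ catsInitA (fun acc x _ => stepA_eq_modify acc x)
    _ = PySem.Set.update catsInitA.keys (tools.map catOf) := h2
    _ = catsInitA.keys :=
        setUpdate_of_subset _ _ (by
          intro x hx
          obtain ⟨t, _, rfl⟩ := List.mem_map.mp hx
          exact catOf_mem_keysInit t)

-- ===== B-side characterisation: staged filtering in closed form =====

def bucketsOf (rules : List (String × List String)) (ts : List String) :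
    List (String × List String) :=
  match rules with
  | [] => []
  | (n, kws) :: rest =>
    let m := ts.filter (fun t => hitAny kws (PySem.Str.lower t))
    (if m.isEmpty then [] else [(n, m)]) ++
      bucketsOf rest (ts.filter (fun t => !hitAny kws (PySem.Str.lower t)))

def remAfter (rules : List (String × List String)) (ts : List String) : List String :=
  match rules with
  | [] => ts
  | (_, kws) :: rest => remAfter rest (ts.filter (fun t => !hitAny kws (PySem.Str.lower t)))

theorem foldB (rules : List (String × List String)) (acc : List (String × List String))
    (ts : List String) :
    rules.foldl stepB (acc, ts.map (fun t => (t, PySem.Str.lower t))) =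
      (acc ++ bucketsOf rules ts, (remAfter rules ts).map (fun t => (t, PySem.Str.lower t))) := by
  induction rules generalizing acc ts with
  | nil => simp [bucketsOf, remAfter]
  | cons r rest ih =>
    obtain ⟨n, kws⟩ := r
    have hmatch : ((ts.map (fun t => (t, PySem.Str.lower t))).filter
        (fun p => hitAny kws p.2)).map (·.1)
        = ts.filter (fun t => hitAny kws (PySem.Str.lower t)) := by
      rw [List.filter_map, List.map_map]
      simp [Function.comp_def]
    have hrem : (ts.map (fun t => (t, PySem.Str.lower t))).filter (fun p => !hitAny kws p.2)
        = (ts.filter (fun t => !hitAny kws (PySem.Str.lower t))).map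
            (fun t => (t, PySem.Str.lower t)) := by
      rw [List.filter_map]
      simp [Function.comp_def]
    simp only [List.foldl_cons, stepB, hmatch, hrem, bucketsOf, remAfter]
    rw [ih]
    by_cases hm : (ts.filter (fun t => hitAny kws (PySem.Str.lower t))).isEmpty <;>
      simp [hm]

-- ===== final bridge: A's per-name buckets = B's staged groups =====

theorem bridge (rules : List (String × List String)) (ts : List String)
    (hnod : (rules.map (·.1)).Nodup) (hoth : "Other" ∉ rules.map (·.1)) :
    ((rules.map (·.1) ++ ["Other"]).map
        (fun nm => (nm, ts.filter (fun t => firstCatR rules t == nm)))).filter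
        (fun p => !p.2.isEmpty)
      = bucketsOf rules ts ++
          (if (remAfter rules ts).isEmpty then [] else [("Other", remAfter rules ts)]) := by
  induction rules generalizing ts with
  | nil =>
    simp only [List.map_nil, List.nil_append, List.map_cons, firstCatR, bucketsOf, remAfter]
    by_cases h : ts.isEmpty <;> simp [h]
  | cons r rest ih =>
    obtain ⟨n, kws⟩ := r
    have hnodr : (rest.map (·.1)).Nodup := (List.nodup_cons.mp hnod).2
    have hn_notin : n ∉ rest.map (·.1) := (List.nodup_cons.mp hnod).1
    have hoth_n : "Other" ≠ n := fun h => hoth (h ▸ List.mem_cons_self ..)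
    have hoth_r : "Other" ∉ rest.map (·.1) := fun h => hoth (List.mem_cons.mpr (Or.inr h))
    -- head bucket: the first-match filter at name n is exactly the keyword hit
    have hhead : ts.filter (fun t => firstCatR ((n, kws) :: rest) t == n)
        = ts.filter (fun t => hitAny kws (PySem.Str.lower t)) := by
      apply List.filter_congr
      intro t _
      simp only [firstCatR]
      by_cases h : hitAny kws (PySem.Str.lower t)
      · simp [h]
      · have hne : firstCatR rest t ≠ n := by
          intro heq
          rcases List.mem_append.mp (firstCatR_mem rest t) with hm | hm
          · exact hn_notin (heq ▸ hm)
          · exact hoth_n ((List.mem_singleton.mp hm).symm.trans heq)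
        simp [h, hne]
    -- tail buckets: a later name collects from the pool with n's matches removed
    have htail : ∀ nm ∈ rest.map (·.1) ++ ["Other"],
        ts.filter (fun t => firstCatR ((n, kws) :: rest) t == nm)
          = (ts.filter (fun t => !hitAny kws (PySem.Str.lower t))).filter
              (fun t => firstCatR rest t == nm) := by
      intro nm hnm
      have hnmn : nm ≠ n := by
        intro heq
        rcases List.mem_append.mp hnm with hm | hm
        · exact hn_notin (heq ▸ hm)
        · exact hoth_n ((List.mem_singleton.mp hm).symm.trans heq)
      rw [List.filter_filter]
      apply List.filter_congr
      intro t _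
      simp only [firstCatR]
      by_cases h : hitAny kws (PySem.Str.lower t)
      · simp [h, Ne.symm hnmn]
      · simp [h]
    simp only [List.map_cons, List.cons_append, bucketsOf, remAfter]
    rw [List.filter_cons]
    have hmapt : ((rest.map (·.1) ++ ["Other"]).map
        (fun nm => (nm, ts.filter (fun t => firstCatR ((n, kws) :: rest) t == nm))))
        = ((rest.map (·.1) ++ ["Other"]).map
        (fun nm => (nm, (ts.filter (fun t => !hitAny kws (PySem.Str.lower t))).filter
            (fun t => firstCatR rest t == nm)))) := by
      apply List.map_congr_left
      intro nm hnm
      exact congrArg _ (htail nm hnm)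
    rw [hhead, hmapt, ih _ hnodr hoth_r]
    by_cases hm : (ts.filter (fun t => hitAny kws (PySem.Str.lower t))).isEmpty <;>
      simp [hm]

theorem keysInit_getD : ∀ k ∈ catsInitA.keys, catsInitA.getD k [] = [] := by decide

-- ===== VERDICT (by name: the statement is the Claim_ definition above) =====
theorem categorize_tools_spec : Claim_equal_categorize_tools := by
  intro tools _
  unfold Spec_categorize_tools
  -- B side in closed form
  have hB : categorize_tools_alt tools
      = bucketsOf RULES tools ++
          (if (remAfter RULES tools).isEmpty then [] else [("Other", remAfter RULES tools)]) := by
    simp only [categorize_tools_alt]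
    rw [foldB RULES [] tools]
    by_cases h : (remAfter RULES tools).isEmpty <;> simp [h, List.map_map, Function.comp_def]
  -- A side in closed form
  have hnodk : (tools.foldl stepA catsInitA).keys.Nodup := by
    rw [foldA_keys]; decide
  have hA : categorize_tools tools
      = ((RULES.map (·.1) ++ ["Other"]).map
          (fun nm => (nm, tools.filter (fun t => firstCatR RULES t == nm)))).filter
          (fun p => !p.2.isEmpty) := by
    unfold categorize_tools
    rw [PySem.Dict.items_eq_map_keys _ hnodk []]
    congr 1
    rw [foldA_keys]
    have hkeys : catsInitA.keys = RULES.map (·.1) ++ ["Other"] := by decide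
    rw [show (fun nm => (nm, tools.filter (fun t => firstCatR RULES t == nm)))
        = (fun nm => (nm, tools.filter (fun t => catOf t == nm))) by
      rw [catOf_eq_firstCatR]]
    rw [← hkeys]
    apply List.map_congr_left
    intro k hk
    rw [foldA_getD, keysInit_getD k hk, List.nil_append]
  rw [hA, hB]
  exact bridge RULES tools (by decide) (by decide)
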